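-- pv_equiv track=rewrite | github.com/Hyott/Busan_LoRA | mapping/ptrn_normalizer.py | remap_legacy_codes
-- ===== SOURCE A (Python) =====
-- from typing import Dict, List, Optional
--
-- _ALLOWED = {0, 1, 2}
--
-- LEGACY_REMAP = {
--     3: 0,
--     4: 2,
--     5: 2,
--     6: 2,
-- }
--
-- def remap_legacy_codes(codes: Optional[List[int]]) -> Optional[List[int]]:
--     """
--     과거 데이터/예측에 섞인 레거시 코드를 새 스펙으로 변환.
--     """
--     if not codes:
--         return codes
--     out = []
--     for c in codes:
--         c2 = LEGACY_REMAP.get(c, c)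
--         if c2 in _ALLOWED:
--             out.append(c2)
--     out = sorted(set(out))
--     return out or None
-- ===== SOURCE B (Python) =====
-- from typing import List, Optional
--
-- # inverse of the legacy remap restricted to the allowed targets:
-- # target code -> the set of input codes that map to it
-- INVERSE = ((0, {0, 3}), (1, {1}), (2, {2, 4, 5, 6}))
--
-- def remap_legacy_codes(codes: Optional[List[int]]) -> Optional[List[int]]:
--     if not codes:
--         return codes
--     present = set(codes)
--     result = [new for new, legacy in INVERSE if present & legacy]
--     return result or None
-- ===== Notes on version B (the rewrite author's own statement) =====
-- stated objective: alternative
-- what changed: B inverts the remap table: it builds one set of the input codes and emits each target code 0,1,2 (in fixed order) iff that set intersects the target's preimage {0,3}/{1}/{2,4,5,6}, replacing A's per-element remap-filter-accumulate followed by set() and sorted().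
import Mathlib
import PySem

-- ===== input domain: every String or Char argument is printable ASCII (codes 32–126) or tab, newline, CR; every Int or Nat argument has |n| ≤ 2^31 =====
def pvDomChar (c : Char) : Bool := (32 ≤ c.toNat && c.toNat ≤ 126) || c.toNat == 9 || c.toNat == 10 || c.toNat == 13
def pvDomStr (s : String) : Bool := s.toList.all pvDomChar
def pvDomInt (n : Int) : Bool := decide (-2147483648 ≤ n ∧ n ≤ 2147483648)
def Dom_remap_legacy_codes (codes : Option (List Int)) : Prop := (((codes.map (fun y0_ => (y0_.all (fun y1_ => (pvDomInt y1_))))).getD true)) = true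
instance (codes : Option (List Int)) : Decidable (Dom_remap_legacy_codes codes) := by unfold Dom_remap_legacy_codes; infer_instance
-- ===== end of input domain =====

-- B inverts the remap table: one set of the inputs, then emit each target 0,1,2 iff the set meets that target's preimage (alternative decomposition; drops the per-element remap/filter and the final set/sorted).

-- ===== PORT A =====
def LEGACY_REMAP : PySem.Dict Int Int := PySem.Dict.ofList [((3:Int), (0:Int)), (4, 2), (5, 2), (6, 2)]

def pvALLOWED : PySem.Set Int := PySem.Set.ofList [0, 1, 2]

def remap_legacy_codes (codes : Option (List Int)) : Option (List Int) :=
  match codes with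
  | none => none
  | some cs =>
    if cs = [] then some cs
    else
      let out := cs.foldl (fun acc c =>
        let c2 := PySem.Dict.getD LEGACY_REMAP c c
        if PySem.Set.contains pvALLOWED c2 then acc ++ [c2] else acc) []
      let out2 := PySem.List.sorted (PySem.Set.ofList out) (fun x => x) false
      if out2 = [] then none else some out2

-- ===== PORT B =====
def pvINVERSE : List (Int × List Int) := [((0:Int), [(0:Int), 3]), (1, [1]), (2, [2, 4, 5, 6])]

def remap_legacy_codes_alt (codes : Option (List Int)) : Option (List Int) :=
  match codes with
  | none => none
  | some cs =>
    if cs = [] then some cs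
    else
      let present := PySem.Set.ofList cs
      let result := pvINVERSE.foldl (fun acc p =>
        if PySem.Set.inter present (PySem.Set.ofList p.2) ≠ [] then acc ++ [p.1] else acc) []
      if result = [] then none else some result

-- ===== PRECONDITION & SPEC =====
def Spec_remap_legacy_codes (codes : Option (List Int)) (out : Option (List Int)) : Prop := out = remap_legacy_codes_alt codes
instance (codes : Option (List Int)) (out : Option (List Int)) : Decidable (Spec_remap_legacy_codes codes out) := by unfold Spec_remap_legacy_codes; infer_instance

-- ===== CLAIM (what is proved, stated in full; the proofs are below) =====
def Claim_equal_remap_legacy_codes : Prop := ∀ (codes : Option (List Int)), Dom_remap_legacy_codes codes → Spec_remap_legacy_codes codes (remap_legacy_codes codes)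

-- ===== LEMMAS AND PROOFS =====

-- the common shape of both results: the increasing list selected by three flags
def pvTarget (f0 f1 f2 : Bool) : List Int :=
  (if f0 then [(0 : Int)] else []) ++ (if f1 then [(1 : Int)] else []) ++ (if f2 then [(2 : Int)] else [])

theorem pvTarget_nodup (f0 f1 f2 : Bool) : (pvTarget f0 f1 f2).Nodup := by
  cases f0 <;> cases f1 <;> cases f2 <;> decide

theorem pvTarget_pairwise (f0 f1 f2 : Bool) :
    (pvTarget f0 f1 f2).Pairwise (fun a b => a < b) := by
  cases f0 <;> cases f1 <;> cases f2 <;> decide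

theorem pvTarget_mem (f0 f1 f2 : Bool) (x : Int) :
    x ∈ pvTarget f0 f1 f2 ↔ (x = 0 ∧ f0 = true) ∨ (x = 1 ∧ f1 = true) ∨ (x = 2 ∧ f2 = true) := by
  cases f0 <;> cases f1 <;> cases f2 <;> simp [pvTarget]

-- sorted(set(l)) for a list with elements in {0,1,2} is the flag rebuild from memberships
theorem sorted_ofList_eq_target (l : List Int) (h : ∀ x ∈ l, x = 0 ∨ x = 1 ∨ x = 2) :
    PySem.List.sorted (PySem.Set.ofList l) (fun x => x) false =
      pvTarget (decide (0 ∈ l)) (decide (1 ∈ l)) (decide (2 ∈ l)) := by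
  apply PySem.List.sorted_eq_of_perm_of_pairwise_lt
  · rw [List.perm_ext_iff_of_nodup (pvTarget_nodup _ _ _) (PySem.Set.nodup_ofList l)]
    intro x
    rw [pvTarget_mem, PySem.Set.mem_ofList]
    constructor
    · rintro (⟨rfl, hx⟩ | ⟨rfl, hx⟩ | ⟨rfl, hx⟩) <;> simpa using hx
    · intro hx
      rcases h x hx with rfl | rfl | rfl
      · exact Or.inl ⟨rfl, by simpa using hx⟩
      · exact Or.inr (Or.inl ⟨rfl, by simpa using hx⟩)
      · exact Or.inr (Or.inr ⟨rfl, by simpa using hx⟩)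
  · exact pvTarget_pairwise _ _ _

-- A's loop step, named for the induction
def pvStepA (acc : List Int) (c : Int) : List Int :=
  let c2 := PySem.Dict.getD LEGACY_REMAP c c
  if PySem.Set.contains pvALLOWED c2 then acc ++ [c2] else acc

-- the concrete remap, as a case formula
theorem pv_getD_remap (c : Int) :
    PySem.Dict.getD LEGACY_REMAP c c =
      if c = 3 then 0 else if c = 4 ∨ c = 5 ∨ c = 6 then 2 else c := by
  have hL : LEGACY_REMAP = PySem.Dict.mk [((3:Int), (0:Int)), (4, 2), (5, 2), (6, 2)] := by decide
  rw [hL]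
  simp only [PySem.Dict.getD, PySem.Dict.get?_mk_cons]
  by_cases h3 : c = 3
  · simp [h3]
  · by_cases h4 : c = 4
    · simp [h4]
    · by_cases h5 : c = 5
      · simp [h5]
      · by_cases h6 : c = 6
        · simp [h6]
        · simp only [beq_iff_eq]
          rw [if_neg (by omega : ¬(3:Int) = c), if_neg (by omega : ¬(4:Int) = c),
            if_neg (by omega : ¬(5:Int) = c), if_neg (by omega : ¬(6:Int) = c),
            if_neg h3, if_neg (by tauto : ¬(c = 4 ∨ c = 5 ∨ c = 6))]
          simp [PySem.Dict.get?]

-- membership in A's accumulated list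
theorem pv_memA (cs : List Int) (acc : List Int) (x : Int) :
    x ∈ cs.foldl pvStepA acc ↔
      x ∈ acc ∨ ∃ c ∈ cs, PySem.Set.contains pvALLOWED (PySem.Dict.getD LEGACY_REMAP c c) = true ∧
        PySem.Dict.getD LEGACY_REMAP c c = x := by
  induction cs generalizing acc with
  | nil => simp
  | cons c cs ih =>
    rw [List.foldl_cons, ih]
    unfold pvStepA
    by_cases hc : PySem.Set.contains pvALLOWED (PySem.Dict.getD LEGACY_REMAP c c) = true
    · simp only [hc, if_pos]
      constructor
      · rintro (hx | hx)
        · rcases List.mem_append.1 hx with hx | hx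
          · exact Or.inl hx
          · exact Or.inr ⟨c, by simp, hc, (List.mem_singleton.1 hx).symm⟩
        · obtain ⟨d, hd, h1, h2⟩ := hx
          exact Or.inr ⟨d, List.mem_cons_of_mem _ hd, h1, h2⟩
      · rintro (hx | ⟨d, hd, h1, h2⟩)
        · exact Or.inl (List.mem_append.2 (Or.inl hx))
        · rcases List.mem_cons.1 hd with rfl | hd
          · exact Or.inl (List.mem_append.2 (Or.inr (by simp [h2])))
          · exact Or.inr ⟨d, hd, h1, h2⟩
    · simp only [hc, Bool.false_eq_true]
      constructor
      · rintro (hx | ⟨d, hd, h1, h2⟩)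
        · exact Or.inl hx
        · exact Or.inr ⟨d, List.mem_cons_of_mem _ hd, h1, h2⟩
      · rintro (hx | ⟨d, hd, h1, h2⟩)
        · exact Or.inl hx
        · rcases List.mem_cons.1 hd with rfl | hd
          · exact absurd h1 hc
          · exact Or.inr ⟨d, hd, h1, h2⟩

-- the three membership facts of A's accumulator, in terms of the input
theorem pv_memA_zero (cs : List Int) :
    (0 : Int) ∈ cs.foldl pvStepA [] ↔ (0 : Int) ∈ cs ∨ (3 : Int) ∈ cs := by
  rw [pv_memA]
  constructor
  · rintro (h | ⟨c, hc, _, h2⟩)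
    · simp at h
    · rw [pv_getD_remap] at h2
      split_ifs at h2 with h3 h456
      · exact Or.inr (h3 ▸ hc)
      · omega
      · exact Or.inl (h2 ▸ hc)
  · rintro (h | h)
    · exact Or.inr ⟨0, h, by decide, by decide⟩
    · exact Or.inr ⟨3, h, by decide, by decide⟩

theorem pv_memA_one (cs : List Int) :
    (1 : Int) ∈ cs.foldl pvStepA [] ↔ (1 : Int) ∈ cs := by
  rw [pv_memA]
  constructor
  · rintro (h | ⟨c, hc, _, h2⟩)
    · simp at h
    · rw [pv_getD_remap] at h2
      split_ifs at h2 with h3 h456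
      · omega
      · omega
      · exact h2 ▸ hc
  · intro h
    exact Or.inr ⟨1, h, by decide, by decide⟩

theorem pv_memA_two (cs : List Int) :
    (2 : Int) ∈ cs.foldl pvStepA [] ↔
      (2 : Int) ∈ cs ∨ (4 : Int) ∈ cs ∨ (5 : Int) ∈ cs ∨ (6 : Int) ∈ cs := by
  rw [pv_memA]
  constructor
  · rintro (h | ⟨c, hc, _, h2⟩)
    · simp at h
    · rw [pv_getD_remap] at h2
      split_ifs at h2 with h3 h456
      · omega
      · rcases h456 with rfl | rfl | rfl
        · exact Or.inr (Or.inl hc)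
        · exact Or.inr (Or.inr (Or.inl hc))
        · exact Or.inr (Or.inr (Or.inr hc))
      · exact Or.inl (h2 ▸ hc)
  · rintro (h | h | h | h)
    · exact Or.inr ⟨2, h, by decide, by decide⟩
    · exact Or.inr ⟨4, h, by decide, by decide⟩
    · exact Or.inr ⟨5, h, by decide, by decide⟩
    · exact Or.inr ⟨6, h, by decide, by decide⟩

-- A's accumulator only holds 0,1,2
theorem pv_subA (cs : List Int) : ∀ x ∈ cs.foldl pvStepA [], x = 0 ∨ x = 1 ∨ x = 2 := by
  intro x hx
  rw [pv_memA] at hx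
  rcases hx with h | ⟨c, _, h1, h2⟩
  · simp at h
  · rw [← h2]
    revert h1
    generalize PySem.Dict.getD LEGACY_REMAP c c = c2
    intro h1
    have : c2 ∈ pvALLOWED := (PySem.Set.contains_iff _ _).1 h1
    simpa [pvALLOWED, PySem.Set.mem_ofList] using this

-- the B-side intersection test reads off a membership disjunction
theorem pv_inter_nonempty (cs pre : List Int) :
    (PySem.Set.inter (PySem.Set.ofList cs) (PySem.Set.ofList pre) ≠ []) ↔ ∃ x ∈ pre, x ∈ cs := by
  rw [Ne, List.eq_nil_iff_forall_not_mem]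
  push Not
  constructor
  · rintro ⟨x, hx⟩
    have := (PySem.Set.mem_inter _ _ _).1 hx
    exact ⟨x, (PySem.Set.mem_ofList _ _).1 this.2, (PySem.Set.mem_ofList _ _).1 this.1⟩
  · rintro ⟨x, hp, hc⟩
    exact ⟨x, (PySem.Set.mem_inter _ _ _).2 ⟨(PySem.Set.mem_ofList _ _).2 hc, (PySem.Set.mem_ofList _ _).2 hp⟩⟩

-- B's three-entry fold, evaluated to the flag rebuild
theorem pvB_fold (cs : List Int) :
    pvINVERSE.foldl (fun acc p =>
        if PySem.Set.inter (PySem.Set.ofList cs) (PySem.Set.ofList p.2) ≠ [] then acc ++ [p.1] else acc) [] =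
      pvTarget (decide ((0:Int) ∈ cs ∨ (3:Int) ∈ cs)) (decide ((1:Int) ∈ cs))
        (decide ((2:Int) ∈ cs ∨ (4:Int) ∈ cs ∨ (5:Int) ∈ cs ∨ (6:Int) ∈ cs)) := by
  have h03 : (PySem.Set.inter (PySem.Set.ofList cs) (PySem.Set.ofList [(0:Int), 3]) ≠ []) ↔
      ((0:Int) ∈ cs ∨ (3:Int) ∈ cs) := by rw [pv_inter_nonempty]; simp
  have h1 : (PySem.Set.inter (PySem.Set.ofList cs) (PySem.Set.ofList [(1:Int)]) ≠ []) ↔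
      ((1:Int) ∈ cs) := by rw [pv_inter_nonempty]; simp
  have h2456 : (PySem.Set.inter (PySem.Set.ofList cs) (PySem.Set.ofList [(2:Int), 4, 5, 6]) ≠ []) ↔
      ((2:Int) ∈ cs ∨ (4:Int) ∈ cs ∨ (5:Int) ∈ cs ∨ (6:Int) ∈ cs) := by
    rw [pv_inter_nonempty]; constructor
    · rintro ⟨x, hx, hc⟩
      simp only [List.mem_cons, List.not_mem_nil, or_false] at hx
      rcases hx with rfl | rfl | rfl | rfl <;> tauto
    · rintro (h | h | h | h)
      exacts [⟨2, by simp, h⟩, ⟨4, by simp, h⟩, ⟨5, by simp, h⟩, ⟨6, by simp, h⟩]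
  simp only [pvINVERSE, List.foldl_cons, List.foldl_nil, pvTarget]
  by_cases c0 : (0:Int) ∈ cs ∨ (3:Int) ∈ cs <;>
    by_cases c1 : (1:Int) ∈ cs <;>
      by_cases c2 : (2:Int) ∈ cs ∨ (4:Int) ∈ cs ∨ (5:Int) ∈ cs ∨ (6:Int) ∈ cs <;>
        simp [h03, h1, h2456, c0, c1, c2]

-- A's result, evaluated to the flag rebuild
theorem pvA_result (cs : List Int) :
    PySem.List.sorted (PySem.Set.ofList (cs.foldl pvStepA [])) (fun x => x) false =
      pvTarget (decide ((0:Int) ∈ cs ∨ (3:Int) ∈ cs)) (decide ((1:Int) ∈ cs))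
        (decide ((2:Int) ∈ cs ∨ (4:Int) ∈ cs ∨ (5:Int) ∈ cs ∨ (6:Int) ∈ cs)) := by
  rw [sorted_ofList_eq_target _ (pv_subA cs)]
  rw [show (decide ((0:Int) ∈ cs.foldl pvStepA [])) = (decide ((0:Int) ∈ cs ∨ (3:Int) ∈ cs)) from
        by simp only [decide_eq_decide]; exact pv_memA_zero cs,
      show (decide ((1:Int) ∈ cs.foldl pvStepA [])) = (decide ((1:Int) ∈ cs)) from
        by simp only [decide_eq_decide]; exact pv_memA_one cs,
      show (decide ((2:Int) ∈ cs.foldl pvStepA [])) = (decide ((2:Int) ∈ cs ∨ (4:Int) ∈ cs ∨ (5:Int) ∈ cs ∨ (6:Int) ∈ cs)) from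
        by simp only [decide_eq_decide]; exact pv_memA_two cs]

-- ===== VERDICT (by name: the statement is the Claim_ definition above) =====
theorem remap_legacy_codes_spec : Claim_equal_remap_legacy_codes := by
  intro codes _
  show remap_legacy_codes codes = remap_legacy_codes_alt codes
  cases codes with
  | none => rfl
  | some cs =>
    by_cases hnil : cs = []
    · subst hnil; rfl
    · show (if cs = [] then some cs else _) = (if cs = [] then some cs else _)
      rw [if_neg hnil, if_neg hnil]
      show (let out := cs.foldl pvStepA [];
            let out2 := PySem.List.sorted (PySem.Set.ofList out) (fun x => x) false;
            if out2 = [] then none else some out2) =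
           (let present := PySem.Set.ofList cs;
            let result := pvINVERSE.foldl (fun acc p =>
              if PySem.Set.inter present (PySem.Set.ofList p.2) ≠ [] then acc ++ [p.1] else acc) [];
            if result = [] then none else some result)
      simp only []
      rw [pvA_result, pvB_fold]
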